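-- pv_equiv track=rewrite | github.com/Site404NotFound/Interview-Practice | mark_and_toys/mark_and_toys_hippler.py | determine_max_toys
-- ===== SOURCE A (Python) =====
-- def determine_max_toys(toys, budget, prices):
--     max_toys = 0
--     total_spent = 0
--     prices.sort()
--     for price in prices:
--         if total_spent + price <= budget:
--             total_spent += price
--             max_toys += 1
--         else:
--             break
--     return max_toys
-- ===== SOURCE B (Python) =====
-- def determine_max_toys(toys, budget, prices):
--     # Sorts prices in place, builds the prefix-sum table of the sorted prices,
--     # then counts how many leading prefix sums fit in the budget.
--     prices.sort()
--     total = 0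
--     prefix = []
--     for price in prices:
--         total += price
--         prefix.append(total)
--     count = 0
--     while count < len(prefix) and prefix[count] <= budget:
--         count += 1
--     return count
-- ===== Notes on version B (the rewrite author's own statement) =====
-- stated objective: alternative
-- what changed: Replaces the fused greedy accumulate-and-break loop over (max_toys, total_spent) with a precomputed prefix-sum table of the sorted prices followed by an index scan counting the leading sums within budget.
import Mathlib
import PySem

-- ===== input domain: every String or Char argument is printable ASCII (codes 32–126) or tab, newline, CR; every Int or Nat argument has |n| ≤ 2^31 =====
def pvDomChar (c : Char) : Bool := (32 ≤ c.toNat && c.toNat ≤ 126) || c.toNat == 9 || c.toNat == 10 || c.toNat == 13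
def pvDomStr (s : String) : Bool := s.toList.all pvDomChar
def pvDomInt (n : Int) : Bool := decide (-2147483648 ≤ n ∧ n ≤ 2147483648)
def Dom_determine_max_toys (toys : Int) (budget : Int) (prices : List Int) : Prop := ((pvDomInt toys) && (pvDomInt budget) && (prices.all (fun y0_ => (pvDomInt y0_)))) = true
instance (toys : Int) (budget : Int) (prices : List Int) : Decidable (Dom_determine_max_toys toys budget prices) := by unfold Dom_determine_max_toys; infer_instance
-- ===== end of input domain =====

-- B replaces A's fused accumulate-and-break loop with a prefix-sum table plus a
-- scan counting the leading sums within budget (objective: alternative, same cost).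
-- Both Pythons sort `prices` in place; the equivalence proved is about the return
-- value (the in-place sort is identical in A and B).

-- ===== PORT A =====
-- A's greedy for-loop with break: state (max_toys, total_spent)
def dmtLoopA (budget : Int) : List Int → Int → Int → Int
  | [], maxToys, _ => maxToys
  | p :: rest, maxToys, spent =>
      if spent + p ≤ budget then dmtLoopA budget rest (maxToys + 1) (spent + p)
      else maxToys

def determine_max_toys (toys : Int) (budget : Int) (prices : List Int) : Int :=
  dmtLoopA budget (PySem.List.sorted prices (fun x => x) false) 0 0

-- ===== PORT B =====
-- B's first loop: builds the prefix-sum table, carrying `total`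
def dmtPrefix : List Int → Int → List Int
  | [], _ => []
  | p :: rest, total => (total + p) :: dmtPrefix rest (total + p)

-- B's while loop: `count < len(prefix)` guards the index, so direct indexing is exact
def dmtCount (table : List Int) (budget : Int) (count : Nat) : Nat :=
  if h : count < table.length then
    if table[count] ≤ budget then dmtCount table budget (count + 1)
    else count
  else count
termination_by table.length - count
decreasing_by omega

def determine_max_toys_alt (toys : Int) (budget : Int) (prices : List Int) : Int :=
  let table := dmtPrefix (PySem.List.sorted prices (fun x => x) false) 0
  Int.ofNat (dmtCount table budget 0)

-- ===== PRECONDITION & SPEC =====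
def Spec_determine_max_toys (toys : Int) (budget : Int) (prices : List Int) (out : Int) : Prop := out = determine_max_toys_alt toys budget prices
instance (toys : Int) (budget : Int) (prices : List Int) (out : Int) : Decidable (Spec_determine_max_toys toys budget prices out) := by unfold Spec_determine_max_toys; infer_instance

-- ===== CLAIM (what is proved, stated in full; the proofs are below) =====
def Claim_equal_determine_max_toys : Prop := ∀ (toys : Int) (budget : Int) (prices : List Int), Dom_determine_max_toys toys budget prices → Spec_determine_max_toys toys budget prices (determine_max_toys toys budget prices)

-- ===== LEMMAS AND PROOFS =====

-- A's greedy loop counts the leading prefix sums ≤ budget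
theorem dmtLoopA_eq_takeWhile (budget : Int) (L : List Int) :
    ∀ (k s : Int),
      dmtLoopA budget L k s =
        k + ((((dmtPrefix L s).takeWhile (fun x => decide (x ≤ budget))).length : Nat) : Int) := by
  induction L with
  | nil => intro k s; simp [dmtLoopA, dmtPrefix]
  | cons p rest ih =>
      intro k s
      simp only [dmtLoopA, dmtPrefix]
      by_cases hle : s + p ≤ budget
      · rw [if_pos hle, ih (k + 1) (s + p),
          List.takeWhile_cons_of_pos (by simpa using hle)]
        simp only [List.length_cons]
        push_cast
        omega
      · rw [if_neg hle, List.takeWhile_cons_of_neg (by simpa using hle)]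
        simp

-- B's while loop counts the leading entries ≤ budget from index `count`
theorem dmtCount_eq_takeWhile (table : List Int) (budget : Int) :
    ∀ count, dmtCount table budget count
      = count + ((table.drop count).takeWhile (fun x => decide (x ≤ budget))).length := by
  intro count
  induction count using dmtCount.induct table budget with
  | case1 count h hle ih =>
      rw [dmtCount, dif_pos h, if_pos hle, ih,
        List.drop_eq_getElem_cons h,
        List.takeWhile_cons_of_pos (by simpa using hle)]
      simp only [List.length_cons]
      omega
  | case2 count h hgt =>
      rw [dmtCount, dif_pos h, if_neg hgt,
        List.drop_eq_getElem_cons h,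
        List.takeWhile_cons_of_neg (by simpa using hgt)]
      simp
  | case3 count h =>
      rw [dmtCount, dif_neg h, List.drop_eq_nil_of_le (by omega)]
      simp

-- ===== VERDICT (by name: the statement is the Claim_ definition above) =====
theorem determine_max_toys_spec : Claim_equal_determine_max_toys := by
  intro toys budget prices _
  unfold Spec_determine_max_toys determine_max_toys determine_max_toys_alt
  set L := PySem.List.sorted prices (fun x => x) false with hL
  show dmtLoopA budget L 0 0
      = Int.ofNat (dmtCount (dmtPrefix L 0) budget 0)
  rw [dmtCount_eq_takeWhile (dmtPrefix L 0) budget 0,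
    dmtLoopA_eq_takeWhile budget L 0 0]
  simp
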